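-- pv_equiv track=rewrite | github.com/juyeonma/python-coding-test-study | String/[BOJ] 2671_잠수함식별.py | pattern1
-- ===== SOURCE A (Python) =====
-- def pattern1(s):
--     if s[:3] == "100" and len(s) > 3:
--         s = list(s[3:])
--         zero = False
--         one = 0
--         for i in range(len(s)):
--             if s[i] == '0' and zero:
--                 s = s[i:]
--                 break
--             if s[i] == '1':
--                 zero = True
--                 one += 1
--         else:
--             if zero:
--                 s = ''
--         if len(s)>2 and one > 1:
--             if s[0] == '0' and s[1] == '0':
--                 s = '1'+ ''.join(map(str, s))
--         return ''.join(map(str, s))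
--     return s
-- ===== SOURCE B (Python) =====
-- def pattern1(s):
--     if s[:3] == "100" and len(s) > 3:
--         rest = s[3:]
--         parts = rest.split('0')
--         for k, part in enumerate(parts):
--             if '1' in part:
--                 if k == len(parts) - 1:
--                     return ''
--                 res = '0' + '0'.join(parts[k + 1:])
--                 if len(res) > 2 and part.count('1') > 1 and res[1] == '0':
--                     res = '1' + res
--                 return res
--         return rest
--     return s
-- ===== Notes on version B (the rewrite author's own statement) =====
-- stated objective: alternative
-- what changed: A's stateful character scan (seen-one flag, running counter, for/else break) is replaced by splitting the suffix at every zero character into a chunk list and walking chunks: the first chunk containing a one character decides everything, the result is a zero joined with the remaining chunks, and the ones-count is that chunk's count.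
import Mathlib
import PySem

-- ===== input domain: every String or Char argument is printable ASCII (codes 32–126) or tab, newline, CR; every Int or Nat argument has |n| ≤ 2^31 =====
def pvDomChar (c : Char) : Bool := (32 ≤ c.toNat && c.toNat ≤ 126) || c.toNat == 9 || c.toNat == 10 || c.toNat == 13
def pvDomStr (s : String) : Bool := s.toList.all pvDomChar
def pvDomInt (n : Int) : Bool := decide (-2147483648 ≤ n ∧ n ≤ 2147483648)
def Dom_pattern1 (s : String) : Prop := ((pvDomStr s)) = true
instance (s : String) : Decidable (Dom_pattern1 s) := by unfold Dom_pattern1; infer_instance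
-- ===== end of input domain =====

-- B replaces A's stateful character scan (seen-one flag + counter + for/else break) by splitting
-- the suffix at every zero character into a chunk list and walking chunks; objective: alternative.

-- ===== PORT A =====
-- A's for-loop over the tail: state (zero, one); returns (broke-at-suffix?, zero, one).
def loopA : List Char → Bool → Nat → Option (List Char) × Bool × Nat
  | [], zero, one => (none, zero, one)
  | ch :: t, zero, one =>
    if ch = '0' ∧ zero = true then (some (ch :: t), zero, one)
    else if ch = '1' then loopA t true (one + 1)
    else loopA t zero one

def bodyA (l : List Char) : String :=
  let r := loopA l false 0
  let s1 : List Char :=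
    match r.1 with
    | some suf => suf
    | none => if r.2.1 then [] else l
  if s1.length > 2 ∧ r.2.2 > 1 then
    if PySem.List.pyGet? s1 0 = some '0' ∧ PySem.List.pyGet? s1 1 = some '0' then
      String.ofList ('1' :: s1)
    else String.ofList s1
  else String.ofList s1

def pattern1 (s : String) : String :=
  if PySem.Str.slice s none (some 3) = "100" ∧ PySem.Str.len s > 3 then
    bodyA (PySem.Str.slice s (some 3) none).toList
  else s

-- ===== PORT B =====
-- B's for-loop over the chunk list parts (tl = parts[k+1:]); 'return rest' is the for's fallthrough.
def goB (rest : List Char) : List (List Char) → String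
  | [] => String.ofList rest
  | part :: tl =>
    if PySem.Chars.isIn ['1'] part = true then
      if tl = [] then ""
      else
        let res := '0' :: PySem.Chars.join ['0'] tl
        if res.length > 2 ∧ PySem.Chars.count part ['1'] > 1 ∧ PySem.List.pyGet? res 1 = some '0' then
          String.ofList ('1' :: res)
        else String.ofList res
    else goB rest tl

def pattern1_alt (s : String) : String :=
  if PySem.Str.slice s none (some 3) = "100" ∧ PySem.Str.len s > 3 then
    let rest := (PySem.Str.slice s (some 3) none).toList
    goB rest (PySem.Chars.splitOn rest ['0'])
  else s

-- ===== PRECONDITION & SPEC =====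
def Spec_pattern1 (s : String) (out : String) : Prop := out = pattern1_alt s
instance (s : String) (out : String) : Decidable (Spec_pattern1 s out) := by unfold Spec_pattern1; infer_instance

-- ===== CLAIM (what is proved, stated in full; the proofs are below) =====
def Claim_equal_pattern1 : Prop := ∀ (s : String), Dom_pattern1 s → Spec_pattern1 s (pattern1 s)

-- ===== LEMMAS AND PROOFS =====

-- reference version of split-on-'0' (consH prepends onto the first chunk)
def consH (p : List Char) : List (List Char) → List (List Char)
  | [] => [p]
  | x :: xs => (p ++ x) :: xs

def split0 : List Char → List (List Char)
  | [] => [[]]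
  | x :: t => if x = '0' then [] :: split0 t else consH [x] (split0 t)

theorem split0_ne_nil (l : List Char) : split0 l ≠ [] := by
  cases l with
  | nil => simp [split0]
  | cons x t =>
    simp only [split0]
    split
    · simp
    · cases h : split0 t <;> simp [consH]

theorem consH_nil_left (L : List (List Char)) (h : L ≠ []) : consH [] L = L := by
  cases L with
  | nil => exact absurd rfl h
  | cons x xs => simp [consH]

theorem split0_zero_cons (t : List Char) : split0 ('0' :: t) = [] :: split0 t := by
  simp [split0]

theorem splitOn_go_spec (l : List Char) : ∀ (fuel : Nat) (cur : List Char) (acc : List (List Char)),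
    l.length < fuel →
    PySem.Chars.splitOn.go ['0'] fuel l cur acc = acc.reverse ++ consH cur.reverse (split0 l) := by
  induction l with
  | nil =>
    intro fuel cur acc h
    cases fuel with
    | zero => omega
    | succ f => simp [PySem.Chars.splitOn.go, split0, consH]
  | cons c t ih =>
    intro fuel cur acc h
    cases fuel with
    | zero => simp at h
    | succ f =>
      by_cases hc : c = '0'
      · subst hc
        rw [PySem.Chars.splitOn.go]
        have hpre : (['0'].isPrefixOf ('0' :: t)) = true := by simp [List.isPrefixOf]
        rw [hpre]
        simp only [if_true, List.length_cons, List.drop_succ_cons, List.length_nil, List.drop_zero]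
        rw [ih f [] (cur.reverse :: acc) (by simp at h; omega)]
        rw [split0_zero_cons, show ([] : List Char).reverse = [] from rfl,
          consH_nil_left _ (split0_ne_nil t)]
        simp [consH]
      · rw [PySem.Chars.splitOn.go]
        have : (['0'].isPrefixOf (c :: t)) = false := by
          simp [List.isPrefixOf]
          exact fun hh => hc hh.symm
        rw [this]
        simp only [Bool.false_eq_true, if_false]
        rw [ih f (c :: cur) acc (by simp at h; omega)]
        simp only [split0, if_neg hc]
        congr 1
        cases hs : split0 t with
        | nil => exact absurd hs (split0_ne_nil t)
        | cons p ps => simp [consH]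

theorem splitOn_eq_split0 (l : List Char) : PySem.Chars.splitOn l ['0'] = split0 l := by
  rw [PySem.Chars.splitOn, splitOn_go_spec l (l.length + 1) [] [] (by omega)]
  simp [consH_nil_left _ (split0_ne_nil l)]

-- join facts
theorem join_consH (x : Char) (L : List (List Char)) (h : L ≠ []) :
    PySem.Chars.join ['0'] (consH [x] L) = x :: PySem.Chars.join ['0'] L := by
  cases L with
  | nil => exact absurd rfl h
  | cons p ps =>
    cases ps with
    | nil => simp [consH, PySem.Chars.join_singleton]
    | cons q qs =>
      simp only [consH]
      rw [show ([x] ++ p) = x :: p by rfl, PySem.Chars.join_cons_cons, PySem.Chars.join_cons_cons]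
      simp

theorem join_cons_of_ne_nil (p : List Char) (tl : List (List Char)) (h : tl ≠ []) :
    PySem.Chars.join ['0'] (p :: tl) = p ++ '0' :: PySem.Chars.join ['0'] tl := by
  cases tl with
  | nil => exact absurd rfl h
  | cons q qs => rw [PySem.Chars.join_cons_cons]; simp

theorem join_split0 (l : List Char) : PySem.Chars.join ['0'] (split0 l) = l := by
  induction l with
  | nil => simp [split0, PySem.Chars.join_singleton]
  | cons x t ih =>
    by_cases hx : x = '0'
    · subst hx
      rw [split0_zero_cons, join_cons_of_ne_nil _ _ (split0_ne_nil t), ih]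
      simp
    · simp only [split0, if_neg hx]
      rw [join_consH _ _ (split0_ne_nil t), ih]

theorem split0_no_zero (l : List Char) : ∀ p ∈ split0 l, '0' ∉ p := by
  induction l with
  | nil => simp [split0]
  | cons x t ih =>
    by_cases hx : x = '0'
    · subst hx
      rw [split0_zero_cons]
      intro p hp
      rcases List.mem_cons.mp hp with rfl | hp
      · simp
      · exact ih p hp
    · simp only [split0, if_neg hx]
      cases hs : split0 t with
      | nil => exact absurd hs (split0_ne_nil t)
      | cons q qs =>
        intro p hp
        rcases List.mem_cons.mp hp with rfl | hp
        · have hq := ih q (by rw [hs]; exact List.mem_cons_self)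
          intro hc
          rcases List.mem_append.mp hc with hc | hc
          · exact hx (List.mem_singleton.mp hc).symm
          · exact hq hc
        · exact ih p (by rw [hs]; exact List.mem_cons_of_mem _ hp)

theorem not_mem_join (parts : List (List Char)) (h : ∀ p ∈ parts, '1' ∉ p) :
    '1' ∉ PySem.Chars.join ['0'] parts := by
  induction parts with
  | nil => simp [PySem.Chars.join_nil]
  | cons p tl ih =>
    cases tl with
    | nil =>
      rw [PySem.Chars.join_singleton]
      exact h p List.mem_cons_self
    | cons q qs =>
      rw [join_cons_of_ne_nil _ _ (by simp)]
      intro hm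
      rcases List.mem_append.mp hm with hm | hm
      · exact h p List.mem_cons_self hm
      · rcases List.mem_cons.mp hm with hc | hm
        · exact absurd hc (by decide)
        · exact ih (fun r hr => h r (List.mem_cons_of_mem _ hr)) hm

theorem mem_join_of_mem {x : Char} {p : List Char} (parts : List (List Char))
    (hp : p ∈ parts) (hx : x ∈ p) : x ∈ PySem.Chars.join ['0'] parts := by
  induction parts with
  | nil => cases hp
  | cons q tl ih =>
    cases tl with
    | nil =>
      rw [PySem.Chars.join_singleton]
      rcases List.mem_cons.mp hp with rfl | hp
      · exact hx
      · cases hp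
    | cons r rs =>
      rw [join_cons_of_ne_nil _ _ (by simp)]
      rcases List.mem_cons.mp hp with rfl | hp
      · exact List.mem_append.mpr (Or.inl hx)
      · exact List.mem_append.mpr (Or.inr (List.mem_cons_of_mem _ (ih hp)))

-- membership test of B
theorem isIn_one_iff (p : List Char) : PySem.Chars.isIn ['1'] p = true ↔ '1' ∈ p := by
  rw [PySem.Chars.isIn, bne_iff_ne, ne_eq, PySem.Chars.find_eq_neg_one_iff, not_not,
    List.singleton_infix_iff]

-- count of a singleton is List.count
theorem count_go_singleton (c : Char) (l : List Char) :
    ∀ fuel acc, l.length ≤ fuel →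
      PySem.Chars.count.go [c] fuel l acc = acc + l.count c := by
  induction l with
  | nil => intro fuel acc _; cases fuel <;> simp [PySem.Chars.count.go]
  | cons x t ih =>
    intro fuel acc hf
    cases fuel with
    | zero => simp at hf
    | succ f =>
      by_cases hx : x = c
      · rw [PySem.Chars.count.go]
        simp only [List.isPrefixOf, hx, beq_self_eq_true, Bool.true_and]
        simp only [List.length, List.drop_succ_cons, List.drop_zero] at *
        rw [ih f (acc + 1) (by omega)]
        simp [hx]
        omega
      · rw [PySem.Chars.count.go]
        have : (c == x) = false := by simp [Ne.symm hx]
        simp only [List.isPrefixOf, this, Bool.false_and, if_false]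
        rw [ih f acc (by simp at hf; omega)]
        simp [List.count_cons, hx]

theorem count_singleton (l : List Char) (c : Char) :
    PySem.Chars.count l [c] = l.count c := by
  rw [PySem.Chars.count]
  simp only [List.isEmpty_cons, if_false, Bool.false_eq_true]
  rw [count_go_singleton c l l.length 0 le_rfl]; omega

-- split a list at the FIRST occurrence of an element
theorem first_split {c : Char} {l : List Char} (h : c ∈ l) :
    ∃ a b, l = a ++ c :: b ∧ c ∉ a := by
  induction l with
  | nil => cases h
  | cons x t ih =>
    by_cases hx : x = c
    · exact ⟨[], t, by simp [hx], by simp⟩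
    · rcases ih ((List.mem_cons.mp h).resolve_left (fun h' => hx h'.symm)) with ⟨a, b, rfl, hna⟩
      exact ⟨x :: a, b, rfl, by simp [hna, Ne.symm hx]⟩

-- loopA facts
theorem loopA_no_one {l : List Char} (h : '1' ∉ l) (n : Nat) :
    loopA l false n = (none, false, n) := by
  induction l with
  | nil => rfl
  | cons x t ih =>
    simp only [List.mem_cons, not_or] at h
    rw [loopA]
    rw [if_neg (by simp), if_neg (Ne.symm h.1)]
    exact ih h.2

theorem loopA_skip_pre {a : List Char} (h : '1' ∉ a) (x : List Char) (n : Nat) :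
    loopA (a ++ x) false n = loopA x false n := by
  induction a with
  | nil => rfl
  | cons y t ih =>
    simp only [List.mem_cons, not_or] at h
    rw [List.cons_append, loopA]
    rw [if_neg (by simp), if_neg (Ne.symm h.1)]
    exact ih h.2

theorem loopA_no_zero {b : List Char} (h : '0' ∉ b) (n : Nat) :
    loopA b true n = (none, true, n + b.count '1') := by
  induction b generalizing n with
  | nil => simp [loopA]
  | cons x t ih =>
    simp only [List.mem_cons, not_or] at h
    rw [loopA]
    rw [if_neg (fun hc => h.1 hc.1.symm)]
    by_cases hx : x = '1'
    · rw [if_pos hx, ih h.2, hx]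
      simp [List.count_cons]
      omega
    · rw [if_neg hx, ih h.2]
      simp [List.count_cons, hx]

theorem loopA_skip_mid {c : List Char} (h : '0' ∉ c) (x : List Char) (n : Nat) :
    loopA (c ++ x) true n = loopA x true (n + c.count '1') := by
  induction c generalizing n with
  | nil => simp
  | cons y t ih =>
    simp only [List.mem_cons, not_or] at h
    rw [List.cons_append, loopA]
    rw [if_neg (fun hc => h.1 hc.1.symm)]
    by_cases hy : y = '1'
    · rw [if_pos hy, ih h.2, hy]
      simp [List.count_cons]
      ring_nf
    · rw [if_neg hy, ih h.2]
      simp [List.count_cons, hy]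

theorem loopA_zero_stays (l : List Char) (n : Nat) : (loopA l true n).2.1 = true := by
  induction l generalizing n with
  | nil => rfl
  | cons x t ih =>
    rw [loopA]
    split
    · rfl
    · split
      · exact ih _
      · exact ih _

theorem loopA_zero_of_mem {l : List Char} (h : '1' ∈ l) (n : Nat) :
    (loopA l false n).2.1 = true := by
  induction l generalizing n with
  | nil => cases h
  | cons x t ih =>
    rw [loopA, if_neg (by simp)]
    by_cases hx : x = '1'
    · rw [if_pos hx]; exact loopA_zero_stays _ _
    · rw [if_neg hx]
      exact ih ((List.mem_cons.mp h).resolve_left (fun h' => hx h'.symm)) n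

-- goB helpers
theorem goB_no_one (rest : List Char) (parts : List (List Char))
    (h : ∀ p ∈ parts, '1' ∉ p) : goB rest parts = String.ofList rest := by
  induction parts with
  | nil => rfl
  | cons p tl ih =>
    rw [goB]
    rw [if_neg (by
      intro hc
      exact h p List.mem_cons_self ((isIn_one_iff p).mp hc))]
    exact ih (fun q hq => h q (List.mem_cons_of_mem _ hq))

theorem goB_rest_irrel (r1 r2 : List Char) (parts : List (List Char))
    (h : ∃ p ∈ parts, '1' ∈ p) : goB r1 parts = goB r2 parts := by
  induction parts with
  | nil => rcases h with ⟨p, hp, _⟩; cases hp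
  | cons p tl ih =>
    rw [goB, goB]
    by_cases hp : PySem.Chars.isIn ['1'] p = true
    · rw [if_pos hp, if_pos hp]
    · rw [if_neg hp, if_neg hp]
      rcases h with ⟨q, hq, hq1⟩
      rcases List.mem_cons.mp hq with rfl | hq
      · exact absurd ((isIn_one_iff q).mpr hq1) hp
      · exact ih ⟨q, hq, hq1⟩

-- bodyA ignores a 1-free prefix ending at a '0' when a '1' follows
theorem bodyA_irrel (p x : List Char) (hp : '1' ∉ p) (hx : '1' ∈ x) :
    bodyA (p ++ '0' :: x) = bodyA x := by
  have hl : loopA (p ++ '0' :: x) false 0 = loopA x false 0 := by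
    rw [loopA_skip_pre hp, loopA, if_neg (by simp), if_neg (by decide)]
  rw [bodyA, bodyA, hl]
  have hz := loopA_zero_of_mem hx 0
  cases hr : (loopA x false 0).1 with
  | some suf => simp [hr]
  | none => simp [hr, hz]

-- bodyA on a chunk with a '1' and no '0', followed by '0' :: x
theorem bodyA_break (part x : List Char) (h1 : '1' ∈ part) (h0 : '0' ∉ part) :
    loopA (part ++ '0' :: x) false 0 = (some ('0' :: x), true, part.count '1') := by
  obtain ⟨a, c, rfl, hna⟩ := first_split h1
  have h0a : '0' ∉ a := fun hc => h0 (List.mem_append.mpr (Or.inl hc))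
  have h0c : '0' ∉ c := fun hc => h0 (by simp [hc])
  rw [List.append_assoc, loopA_skip_pre hna, List.cons_append, loopA,
    if_neg (by simp), if_pos rfl, loopA_skip_mid h0c, loopA, if_pos ⟨rfl, rfl⟩]
  have ha : a.count '1' = 0 := List.count_eq_zero.mpr hna
  simp [List.count_append, List.count_cons, ha]
  omega

-- bodyA on a final chunk with a '1' and no '0' gives ""
theorem bodyA_last (part : List Char) (h1 : '1' ∈ part) (h0 : '0' ∉ part) :
    bodyA part = "" := by
  obtain ⟨a, c, rfl, hna⟩ := first_split h1
  have h0c : '0' ∉ c := fun hc => h0 (by simp [hc])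
  have hl : loopA (a ++ '1' :: c) false 0 = (none, true, 1 + c.count '1') := by
    rw [loopA_skip_pre hna, loopA, if_neg (by simp), if_pos rfl, loopA_no_zero h0c]
  rw [bodyA, hl]
  simp

-- the main induction over the chunk list
theorem main_chunks (parts : List (List Char)) (hne : parts ≠ [])
    (hz : ∀ p ∈ parts, '0' ∉ p) :
    goB (PySem.Chars.join ['0'] parts) parts = bodyA (PySem.Chars.join ['0'] parts) := by
  induction parts with
  | nil => exact absurd rfl hne
  | cons part tl ih =>
    by_cases h1 : '1' ∈ part
    · -- head chunk holds the first '1'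
      cases tl with
      | nil =>
        rw [PySem.Chars.join_singleton, goB, if_pos ((isIn_one_iff part).mpr h1)]
        exact (bodyA_last part h1 (hz part List.mem_cons_self)).symm
      | cons q qs =>
        rw [join_cons_of_ne_nil _ _ (by simp), goB, if_pos ((isIn_one_iff part).mpr h1),
          if_neg (by simp)]
        set x := PySem.Chars.join ['0'] (q :: qs) with hxdef
        have hbrk := bodyA_break part x h1 (hz part List.mem_cons_self)
        rw [bodyA, hbrk]
        simp only
        rw [count_singleton]
        have hg0 : PySem.List.pyGet? ('0' :: x) 0 = some '0' := by
          simp [PySem.List.pyGet?, PySem.List.pyIdx?]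
        by_cases hg1 : PySem.List.pyGet? ('0' :: x) 1 = some '0'
        · by_cases hbig : ('0' :: x).length > 2 ∧ part.count '1' > 1
          · rw [if_pos (show ('0' :: x).length > 2 ∧ part.count '1' > 1 ∧
                PySem.List.pyGet? ('0' :: x) 1 = some '0' from ⟨hbig.1, hbig.2, hg1⟩),
              if_pos hbig, if_pos ⟨hg0, hg1⟩]
          · rw [if_neg (show ¬(('0' :: x).length > 2 ∧ part.count '1' > 1 ∧
                PySem.List.pyGet? ('0' :: x) 1 = some '0') from by tauto), if_neg hbig]
        · by_cases hbig : ('0' :: x).length > 2 ∧ part.count '1' > 1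
          · rw [if_neg (show ¬(('0' :: x).length > 2 ∧ part.count '1' > 1 ∧
                PySem.List.pyGet? ('0' :: x) 1 = some '0') from by tauto), if_pos hbig,
              if_neg (show ¬(PySem.List.pyGet? ('0' :: x) 0 = some '0' ∧
                PySem.List.pyGet? ('0' :: x) 1 = some '0') from by tauto)]
          · rw [if_neg (show ¬(('0' :: x).length > 2 ∧ part.count '1' > 1 ∧
                PySem.List.pyGet? ('0' :: x) 1 = some '0') from by tauto), if_neg hbig]
    · -- head chunk has no '1'
      by_cases htl : ∃ q ∈ tl, '1' ∈ q
      · -- a later chunk has the first '1': strip the head chunk on both sides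
        have htlne : tl ≠ [] := by rcases htl with ⟨q, hq, _⟩; intro h; subst h; cases hq
        rw [join_cons_of_ne_nil _ _ htlne, goB,
          if_neg (fun hc => h1 ((isIn_one_iff part).mp hc))]
        rw [goB_rest_irrel _ (PySem.Chars.join ['0'] tl) tl htl,
          ih htlne (fun q hq => hz q (List.mem_cons_of_mem _ hq))]
        rcases htl with ⟨q, hq, hq1⟩
        exact (bodyA_irrel part (PySem.Chars.join ['0'] tl) h1
          (mem_join_of_mem tl hq hq1)).symm
      · -- no chunk has a '1' at all: both return the joined list unchanged
        replace htl : ∀ q ∈ tl, '1' ∉ q := by simpa using htl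
        have hall : ∀ p ∈ part :: tl, '1' ∉ p := by
          intro p hp
          rcases List.mem_cons.mp hp with rfl | hp
          · exact h1
          · exact htl p hp
        rw [goB_no_one _ _ hall]
        have hnj : '1' ∉ PySem.Chars.join ['0'] (part :: tl) := not_mem_join _ hall
        rw [bodyA, loopA_no_one hnj 0]
        simp

-- ===== VERDICT (by name: the statement is the Claim_ definition above) =====
theorem pattern1_spec : Claim_equal_pattern1 := by
  intro s _
  unfold Spec_pattern1 pattern1 pattern1_alt
  split
  · simp only
    rw [splitOn_eq_split0]
    have hj := join_split0 (PySem.Str.slice s (some 3) none).toList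
    calc bodyA (PySem.Str.slice s (some 3) none).toList
        = bodyA (PySem.Chars.join ['0'] (split0 (PySem.Str.slice s (some 3) none).toList)) := by rw [hj]
      _ = goB (PySem.Chars.join ['0'] (split0 (PySem.Str.slice s (some 3) none).toList))
            (split0 (PySem.Str.slice s (some 3) none).toList) :=
          (main_chunks _ (split0_ne_nil _) (split0_no_zero _)).symm
      _ = goB (PySem.Str.slice s (some 3) none).toList (split0 (PySem.Str.slice s (some 3) none).toList) := by rw [hj]
  · rfl
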